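-- pv_equiv track=rewrite | github.com/bibujohny/rentalAI | app/utils/axis_bank.py | _strip_summary_tokens
-- ===== SOURCE A (Python) =====
-- SUMMARY_TOKENS = ("transaction total", "closing balance", "opening balance")
--
-- def _strip_summary_tokens(text: str) -> str:
--     """Remove summary phrases (TRANSACTION TOTAL, CLOSING BALANCE, OPENING BALANCE) from particulars.
--     Keeps content before the first summary token, trims whitespace."""
--     if not text:
--         return ""
--     low = text.lower()
--     cut = len(text)
--     for tok in SUMMARY_TOKENS:
--         idx = low.find(tok)
--         if idx >= 0:
--             cut = min(cut, idx)
--     cleaned = text[:cut].strip()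
--     return ' '.join(cleaned.split())
-- ===== SOURCE B (Python) =====
-- SUMMARY_TOKENS = ("transaction total", "closing balance", "opening balance")
--
-- def _strip_summary_tokens(text: str) -> str:
--     """Keep content before the first summary token; collapse whitespace.
--     One left-to-right scan checking all tokens at each position, instead of
--     one .find() pass per token with a running minimum."""
--     low = text.lower()
--     cut = len(text)
--     for i in range(len(low)):
--         if any(low.startswith(tok, i) for tok in SUMMARY_TOKENS):
--             cut = i
--             break
--     return ' '.join(text[:cut].split())
-- ===== Notes on version B (the rewrite author's own statement) =====
-- stated objective: alternative
-- what changed: Replaces A's per-token .find() passes with a running minimum by a single left-to-right scan of the lowered text that stops at the first position where any summary token starts, and drops the redundant .strip() before split().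
import Mathlib
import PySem

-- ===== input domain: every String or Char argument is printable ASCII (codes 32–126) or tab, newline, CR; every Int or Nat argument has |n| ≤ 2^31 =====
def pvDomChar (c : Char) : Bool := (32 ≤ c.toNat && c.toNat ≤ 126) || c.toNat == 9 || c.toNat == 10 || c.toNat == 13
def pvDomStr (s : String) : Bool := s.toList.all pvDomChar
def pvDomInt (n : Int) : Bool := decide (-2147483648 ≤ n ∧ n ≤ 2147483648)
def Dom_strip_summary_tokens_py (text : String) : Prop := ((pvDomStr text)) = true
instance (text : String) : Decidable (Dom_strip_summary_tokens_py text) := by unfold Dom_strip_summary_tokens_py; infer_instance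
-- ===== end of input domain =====

-- B replaces A's three .find() passes with a running minimum by a single left-to-right
-- scan that stops at the first position where any summary token starts (simpler/alternative).

-- ===== PORT A =====
def pvSummaryTokens : List String := ["transaction total", "closing balance", "opening balance"]

def strip_summary_tokens_py (text : String) : String :=
  if text = "" then ""
  else
    let low := PySem.Str.lower text
    let cut0 : Int := PySem.Str.len text
    let cut : Int := pvSummaryTokens.foldl (fun cut tok =>
      let idx := PySem.Str.find low tok
      if 0 ≤ idx then min cut idx else cut) cut0
    let cleaned := PySem.Str.strip (PySem.Str.slice text none (some cut))
    PySem.Str.join " " (PySem.Str.split₀ cleaned)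

-- ===== PORT B =====
def pvToks : List (List Char) :=
  ["transaction total".toList, "closing balance".toList, "opening balance".toList]

-- any(low.startswith(tok, i) for tok in SUMMARY_TOKENS), with the suffix low[i:] passed
-- directly (startswith with a start index 0 ≤ i is exactly a prefix test on the suffix)
def pvHit (s : List Char) : Bool := pvToks.any (fun tok => PySem.Chars.startswith s tok)

-- the 'for i in range(len(low)): … break' loop; falling off the end leaves cut = len(text)
def pvScan : List Char → Nat → Nat
  | [], i => i
  | c :: rest, i => if pvHit (c :: rest) then i else pvScan rest (i + 1)

def strip_summary_tokens_py_alt (text : String) : String :=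
  let tl := text.toList
  let cut := pvScan (PySem.Chars.lower tl) 0
  -- text[:cut] with 0 ≤ cut ≤ len(text) is exactly List.take
  PySem.Str.join " " (PySem.Str.split₀ (String.ofList (tl.take cut)))

-- ===== PRECONDITION & SPEC =====
def Spec_strip_summary_tokens_py (text : String) (out : String) : Prop := out = strip_summary_tokens_py_alt text
instance (text : String) (out : String) : Decidable (Spec_strip_summary_tokens_py text out) := by unfold Spec_strip_summary_tokens_py; infer_instance

-- ===== CLAIM (what is proved, stated in full; the proofs are below) =====
def Claim_equal_strip_summary_tokens_py : Prop := ∀ (text : String), Dom_strip_summary_tokens_py text → Spec_strip_summary_tokens_py text (strip_summary_tokens_py text)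

-- ===== LEMMAS AND PROOFS =====

-- shifting the position counter commutes with the scan
lemma pvScan_succ (s : List Char) (i : Nat) : pvScan s (i + 1) = pvScan s i + 1 := by
  induction s generalizing i with
  | nil => rfl
  | cons c rest ih =>
    simp only [pvScan]
    split_ifs <;> simp [ih]

lemma pvScan_le (s : List Char) : pvScan s 0 ≤ s.length := by
  induction s with
  | nil => simp [pvScan]
  | cons c rest ih =>
    simp only [pvScan]
    split_ifs
    · simp
    · rw [pvScan_succ]; simpa using ih

lemma pvScan_min (s : List Char) : ∀ k < pvScan s 0, pvHit (s.drop k) = false := by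
  induction s with
  | nil => simp [pvScan]
  | cons c rest ih =>
    intro k hk
    simp only [pvScan] at hk
    split_ifs at hk with h
    · omega
    · rw [pvScan_succ] at hk
      match k with
      | 0 => simpa using h
      | k + 1 => exact ih k (by omega)

lemma pvScan_hit (s : List Char) :
    pvScan s 0 = s.length ∨ pvHit (s.drop (pvScan s 0)) = true := by
  induction s with
  | nil => left; rfl
  | cons c rest ih =>
    simp only [pvScan]
    split_ifs with h
    · right; simpa using h
    · rw [pvScan_succ]
      rcases ih with h1 | h1
      · left; simp [h1]
      · right; simpa using h1

-- A's fold over the tokens: generic facts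
lemma foldA_le_init (low : List Char) (L : List String) (init : Int) :
    L.foldl (fun cut tok =>
      if 0 ≤ PySem.Chars.find low tok.toList then min cut (PySem.Chars.find low tok.toList) else cut) init ≤ init := by
  induction L generalizing init with
  | nil => simp
  | cons t L ih =>
    simp only [List.foldl_cons]
    refine le_trans (ih _) ?_
    split_ifs <;> simp

lemma foldA_le_find (low : List Char) (L : List String) (init : Int) :
    ∀ tok ∈ L, 0 ≤ PySem.Chars.find low tok.toList →
      L.foldl (fun cut tok =>
        if 0 ≤ PySem.Chars.find low tok.toList then min cut (PySem.Chars.find low tok.toList) else cut) init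
        ≤ PySem.Chars.find low tok.toList := by
  induction L generalizing init with
  | nil => simp
  | cons t L ih =>
    intro tok htok hpos
    rcases List.mem_cons.mp htok with rfl | hmem
    · simp only [List.foldl_cons]
      refine le_trans (foldA_le_init _ _ _) ?_
      simp [hpos]
    · exact ih _ tok hmem hpos

lemma foldA_cases (low : List Char) (L : List String) (init : Int) :
    L.foldl (fun cut tok =>
      if 0 ≤ PySem.Chars.find low tok.toList then min cut (PySem.Chars.find low tok.toList) else cut) init = init ∨
    ∃ tok ∈ L, L.foldl (fun cut tok =>
      if 0 ≤ PySem.Chars.find low tok.toList then min cut (PySem.Chars.find low tok.toList) else cut) init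
        = PySem.Chars.find low tok.toList ∧ 0 ≤ PySem.Chars.find low tok.toList := by
  induction L generalizing init with
  | nil => left; rfl
  | cons t L ih =>
    simp only [List.foldl_cons]
    rcases ih (if 0 ≤ PySem.Chars.find low t.toList then min init (PySem.Chars.find low t.toList) else init) with h | ⟨tok, hmem, h, hpos⟩
    · rw [h]
      split_ifs with hp
      · rcases min_choice init (PySem.Chars.find low t.toList) with hm | hm
        · left; exact hm
        · right; exact ⟨t, by simp, hm, hp⟩
      · left; rfl
    · right; exact ⟨tok, by simp [hmem], h, hpos⟩

-- pvHit in terms of A's tokens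
lemma pvHit_iff (s : List Char) :
    pvHit s = true ↔ ∃ tok ∈ pvSummaryTokens, tok.toList <+: s := by
  have : pvToks = pvSummaryTokens.map String.toList := by decide
  simp [pvHit, this, List.any_eq_true, PySem.Chars.startswith, List.isPrefixOf_iff_prefix]

lemma pvTok_ne_nil : ∀ tok ∈ pvSummaryTokens, tok.toList ≠ [] := by decide

-- the central fact: A's running minimum of finds = B's first hit position
lemma cut_eq (low : List Char) :
    pvSummaryTokens.foldl (fun cut tok =>
      if 0 ≤ PySem.Chars.find low tok.toList then min cut (PySem.Chars.find low tok.toList) else cut)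
      (low.length : Int) = (pvScan low 0 : Int) := by
  set c := pvScan low 0 with hc
  have hcle := pvScan_le low
  -- upper bound: the fold is ≥ c
  have hge : (c : Int) ≤ pvSummaryTokens.foldl (fun cut tok =>
      if 0 ≤ PySem.Chars.find low tok.toList then min cut (PySem.Chars.find low tok.toList) else cut)
      (low.length : Int) := by
    rcases foldA_cases low pvSummaryTokens (low.length : Int) with h | ⟨tok, hmem, h, hpos⟩
    · rw [h]; exact_mod_cast hcle
    · rw [h]
      by_contra hlt
      have htn : (PySem.Chars.find low tok.toList).toNat < c := by omega
      have hpref := (PySem.Chars.find_spec hpos).1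
      have : pvHit (low.drop (PySem.Chars.find low tok.toList).toNat) = true :=
        (pvHit_iff _).mpr ⟨tok, hmem, hpref⟩
      rw [pvScan_min low _ htn] at this
      exact Bool.false_ne_true this
  rcases pvScan_hit low with hlen | hhit
  · -- no hit anywhere: the fold stays at len(low) = c
    rcases foldA_cases low pvSummaryTokens (low.length : Int) with h | ⟨tok, hmem, h, hpos⟩
    · rw [h]; exact_mod_cast hlen.symm
    · exfalso
      have hpref := (PySem.Chars.find_spec hpos).1
      have htn : (PySem.Chars.find low tok.toList).toNat < low.length := by
        rcases hpref with ⟨t2, ht2⟩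
        have hne := pvTok_ne_nil tok hmem
        have : low.drop (PySem.Chars.find low tok.toList).toNat ≠ [] := by
          intro hnil; rw [hnil] at ht2
          exact hne (List.append_eq_nil_iff.mp ht2).1
        have := List.drop_eq_nil_iff.not.mp this
        omega
      have : pvHit (low.drop (PySem.Chars.find low tok.toList).toNat) = true :=
        (pvHit_iff _).mpr ⟨tok, hmem, hpref⟩
      rw [pvScan_min low _ (by omega)] at this
      exact Bool.false_ne_true this
  · -- a hit at c: some token has find ≤ c, so the fold is ≤ c
    obtain ⟨tok, hmem, hpref⟩ := (pvHit_iff _).mp hhit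
    have hinf : tok.toList <:+: low :=
      (PySem.Chars.isIn_iff_infix _ _).mp
        ((PySem.Chars.exists_prefix_drop_iff_isIn _ _).mp ⟨c, hpref⟩)
    have hpos : 0 ≤ PySem.Chars.find low tok.toList := (PySem.Chars.find_nonneg_iff _ _).mpr hinf
    have hmin := (PySem.Chars.find_spec hpos).2
    have htle : (PySem.Chars.find low tok.toList).toNat ≤ c := by
      by_contra hlt
      exact hmin c (by omega) hpref
    have hle := foldA_le_find low pvSummaryTokens (low.length : Int) tok hmem hpos
    omega

-- split₀ ignores surrounding whitespace
lemma split₀_go_ws (ws : List Char) (h : ∀ c ∈ ws, PySem.Chars.isspace c = true) :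
    ∀ cur acc, PySem.Chars.split₀.go ws cur acc = PySem.Chars.split₀.go [] cur acc := by
  induction ws with
  | nil => intro cur acc; rfl
  | cons w ws ih =>
    intro cur acc
    have hw : PySem.Chars.isspace w = true := h w (by simp)
    have hws : ∀ c ∈ ws, PySem.Chars.isspace c = true := fun c hc => h c (by simp [hc])
    simp only [PySem.Chars.split₀.go, hw, if_true]
    by_cases hcur : cur.isEmpty
    · rw [if_pos hcur, ih hws, if_pos hcur]
      rfl
    · rw [if_neg hcur, ih hws, if_neg hcur]
      rfl

lemma split₀_go_append_ws (s ws : List Char) (h : ∀ c ∈ ws, PySem.Chars.isspace c = true) :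
    ∀ cur acc, PySem.Chars.split₀.go (s ++ ws) cur acc = PySem.Chars.split₀.go s cur acc := by
  induction s with
  | nil => intro cur acc; simpa using split₀_go_ws ws h cur acc
  | cons x s ih =>
    intro cur acc
    simp only [List.cons_append, PySem.Chars.split₀.go]
    split_ifs <;> simp [ih]

lemma split₀_lstrip (s : List Char) : PySem.Chars.split₀ (PySem.Chars.lstrip s) = PySem.Chars.split₀ s := by
  induction s with
  | nil => rfl
  | cons x s ih =>
    by_cases hx : PySem.Chars.isspace x
    · simpa [PySem.Chars.lstrip, hx, PySem.Chars.split₀,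
        PySem.Chars.split₀.go] using ih
    · simp [PySem.Chars.lstrip, hx]

lemma split₀_rstrip (s : List Char) : PySem.Chars.split₀ (PySem.Chars.rstrip s) = PySem.Chars.split₀ s := by
  have hdecomp : s = PySem.Chars.rstrip s ++ (s.reverse.takeWhile PySem.Chars.isspace).reverse := by
    unfold PySem.Chars.rstrip
    rw [← List.reverse_append, List.takeWhile_append_dropWhile, List.reverse_reverse]
  have hws : ∀ c ∈ (s.reverse.takeWhile PySem.Chars.isspace).reverse, PySem.Chars.isspace c = true := by
    intro c hc
    exact List.mem_takeWhile_imp (List.mem_reverse.mp hc)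
  conv_rhs => rw [hdecomp]
  unfold PySem.Chars.split₀
  rw [split₀_go_append_ws _ _ hws]

lemma split₀_strip (s : List Char) : PySem.Chars.split₀ (PySem.Chars.strip s) = PySem.Chars.split₀ s := by
  unfold PySem.Chars.strip
  rw [split₀_rstrip, split₀_lstrip]

-- ===== VERDICT (by name: the statement is the Claim_ definition above) =====
theorem strip_summary_tokens_py_spec : Claim_equal_strip_summary_tokens_py := by
  intro text _
  unfold Spec_strip_summary_tokens_py
  by_cases htext : text = ""
  · subst htext; decide
  · unfold strip_summary_tokens_py strip_summary_tokens_py_alt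
    rw [if_neg htext]
    simp only [PySem.Str.len_eq, PySem.Str.find_eq, PySem.Str.toList_lower]
    have hlen : text.toList.length = (PySem.Chars.lower text.toList).length := by
      simp [PySem.Chars.lower]
    rw [hlen, cut_eq (PySem.Chars.lower text.toList)]
    set c := pvScan (PySem.Chars.lower text.toList) 0 with hc
    have hslice : (PySem.Str.slice text none (some (c : Int))).toList = text.toList.take c := by
      rw [PySem.Str.toList_slice, PySem.Chars.slice_eq_listSlice, PySem.List.slice_to_natCast]
    have hsplit : PySem.Str.split₀ (PySem.Str.strip (PySem.Str.slice text none (some (c : Int))))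
        = PySem.Str.split₀ (String.ofList (text.toList.take c)) := by
      unfold PySem.Str.split₀
      rw [PySem.Str.toList_strip, hslice, split₀_strip, String.toList_ofList]
    rw [hsplit]
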